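-- pv_equiv track=rewrite | github.com/Anshul-GH/upwork_dna_analysis | dna_replication_check.py | mostCommonK
-- ===== SOURCE A (Python) =====
-- def mostCommonK(dna, length):
--     '''This method implements the core logic to search the most common substring of a given length
--     supplied as input and returns the string and the frequency count.
--
--     Input Parameters:
--
--     dna: [type: string]: [description:
--         input source dna string data read from the source text file]
--
--     length: [type: integer]: [description:
--         it is the length of the substring to be considered while identifying the frequency of occourance
--         for all the substrings of the same 'length']
--
--     Returns:
--
--     max_str: [type: integer]: [description:
--         identified substring that is the most common - that is one with the highest frequency of
--         occourance];
--
--     max_count: [type: integer]: [description: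
--         the frequency of occourance for the 'max_str' identified above];
--
--     Console Output: [None];
--
--     '''
--     # max string for a given length
--     max_str = ''
--     # count of occourance for the above string
--     max_count = 0
--
--     # maximum possible iterations for a substring with specific length
--     iterations = len(dna) - length
--     # fetch the substrings, one at a time, for a given length
--     for index in range(iterations):
--         # counter for occourance for each substring
--         counter = 0
--         substr = dna[index:length+index]
--         # for each chosen substr, look for a match
--         for subindex in range(iterations):
--             if dna[subindex:length+subindex] == substr:
--                 counter += 1
--
--         # store the sring with max length and max count
--         # Please Note: this is to store the max count string info for a given 'length'
--         if counter > max_count: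
--             max_str = substr
--             max_count = counter
--
--     return max_str, max_count
-- ===== SOURCE B (Python) =====
-- def mostCommonK(dna, length):
--     # One pass building a count table keyed by substring (insertion order =
--     # first-occurrence order), then a single max over the table; the inner
--     # rescan of A disappears.
--     iterations = len(dna) - length
--     counts = {}
--     for index in range(iterations):
--         substr = dna[index:length + index]
--         counts[substr] = counts.get(substr, 0) + 1
--     if not counts:
--         return '', 0
--     return max(counts.items(), key=lambda kv: kv[1])
-- ===== Notes on version B (the rewrite author's own statement) =====
-- stated objective: faster
-- what changed: Replaced A's nested rescan (re-counting every substring against every other) by a single pass that builds a dict of substring counts and one max over its items, using dict insertion order for A's earliest-first tie-break.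
import Mathlib
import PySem

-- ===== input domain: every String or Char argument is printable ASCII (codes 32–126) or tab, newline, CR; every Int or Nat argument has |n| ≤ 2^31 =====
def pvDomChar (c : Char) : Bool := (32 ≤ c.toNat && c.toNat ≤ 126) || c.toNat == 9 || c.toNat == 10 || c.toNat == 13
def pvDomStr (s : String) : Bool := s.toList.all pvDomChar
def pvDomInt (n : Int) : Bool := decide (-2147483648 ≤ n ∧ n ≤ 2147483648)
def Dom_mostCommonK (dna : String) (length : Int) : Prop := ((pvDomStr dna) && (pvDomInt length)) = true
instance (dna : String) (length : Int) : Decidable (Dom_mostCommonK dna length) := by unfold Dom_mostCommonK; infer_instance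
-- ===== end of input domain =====

-- B replaces A's quadratic nested rescan by one counting pass over a dict plus a single max over its items (measurably faster).


-- ===== PORT A =====
def mostCommonK (dna : String) (length : Int) : String × Int :=
  let cs := dna.toList
  let iterations : Int := (cs.length : Int) - length
  (PySem.List.pyRange 0 iterations 1).foldl
    (fun (acc : String × Int) index =>
      let substr := PySem.List.slice cs (some index) (some (length + index))
      let counter : Int := (PySem.List.pyRange 0 iterations 1).foldl
        (fun c subindex =>
          if PySem.List.slice cs (some subindex) (some (length + subindex)) = substr then c + 1 else c)
        0
      if counter > acc.2 then (String.ofList substr, counter) else acc)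
    ("", 0)

-- ===== PORT B =====
def mostCommonK_alt (dna : String) (length : Int) : String × Int :=
  let cs := dna.toList
  let iterations : Int := (cs.length : Int) - length
  let counts : PySem.Dict (List Char) Int :=
    (PySem.List.pyRange 0 iterations 1).foldl
      (fun d index =>
        let substr := PySem.List.slice cs (some index) (some (length + index))
        d.insert substr (d.getD substr 0 + 1))
      PySem.Dict.empty
  if counts.items.isEmpty then ("", 0)
  else
    match PySem.List.max? counts.items (fun kv => kv.2) with
    | some kv => (String.ofList kv.1, kv.2)
    | none => ("", 0)

-- ===== PRECONDITION & SPEC =====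
def Spec_mostCommonK (dna : String) (length : Int) (out : String × Int) : Prop := out = mostCommonK_alt dna length
instance (dna : String) (length : Int) (out : String × Int) : Decidable (Spec_mostCommonK dna length out) := by unfold Spec_mostCommonK; infer_instance

-- ===== CLAIM (what is proved, stated in full; the proofs are below) =====
def Claim_equal_mostCommonK : Prop := ∀ (dna : String) (length : Int), Dom_mostCommonK dna length → Spec_mostCommonK dna length (mostCommonK dna length)

-- ===== LEMMAS AND PROOFS =====

-- the list of candidate substrings, in index order
def pvSubs (cs : List Char) (length : Int) : List (List Char) :=
  (PySem.List.pyRange 0 ((cs.length : Int) - length) 1).map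
    (fun i => PySem.List.slice cs (some i) (some (length + i)))

-- key ↦ (key, its count in subs)
def pvFk (subs : List (List Char)) (s : List Char) : List Char × Int := (s, (subs.count s : Int))

-- A's outer-loop step, as a function of the (substring, count) pair
def pvStepA (acc : String × Int) (p : List Char × Int) : String × Int :=
  if p.2 > acc.2 then (String.ofList p.1, p.2) else acc

-- plain first-max step (max?'s step without the option)
def pvStepM (m p : List Char × Int) : List Char × Int := if m.2 < p.2 then p else m

-- counting loop = List.count
theorem pvCountF (sub : List Char) : ∀ (xs : List (List Char)) (a : Int),
    xs.foldl (fun c s => if s = sub then c + 1 else c) a = a + (xs.count sub : Int) := by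
  intro xs
  induction xs with
  | nil => intro a; simp
  | cons x t ih =>
    intro a
    by_cases h : x = sub <;> simp [List.count_cons, h, ih] <;> push_cast <;> ring

-- A's port, rewritten as a fold over the (substring, count) pairs
theorem pvA_eq (dna : String) (length : Int) :
    mostCommonK dna length
      = ((pvSubs dna.toList length).map (pvFk (pvSubs dna.toList length))).foldl pvStepA ("", 0) := by
  unfold mostCommonK pvSubs
  simp only [List.map_map, List.foldl_map]
  congr 1
  funext acc i
  simp only [Function.comp, pvStepA, pvFk]
  rw [show ((PySem.List.pyRange 0 ((dna.toList.length : Int) - length) 1).foldl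
        (fun c subindex =>
          if PySem.List.slice dna.toList (some subindex) (some (length + subindex))
              = PySem.List.slice dna.toList (some i) (some (length + i)) then c + 1 else c) 0)
      = (0 : Int) + (((PySem.List.pyRange 0 ((dna.toList.length : Int) - length) 1).map
          (fun j => PySem.List.slice dna.toList (some j) (some (length + j)))).count
            (PySem.List.slice dna.toList (some i) (some (length + i))) : Int) from by
    rw [← pvCountF]; rw [List.foldl_map]]
  simp

-- B's port, rewritten through counter/items
theorem pvB_eq (dna : String) (length : Int) :
    mostCommonK_alt dna length
      = (let items := (PySem.Set.ofList (pvSubs dna.toList length)).map (pvFk (pvSubs dna.toList length));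
         if items.isEmpty then ("", 0)
         else match PySem.List.max? items (fun kv => kv.2) with
              | some kv => (String.ofList kv.1, kv.2)
              | none => ("", 0)) := by
  unfold mostCommonK_alt pvSubs
  simp only [List.foldl_map]
  rw [show ((PySem.List.pyRange 0 ((dna.toList.length : Int) - length) 1).foldl
        (fun d index =>
          d.insert (PySem.List.slice dna.toList (some index) (some (length + index)))
            (d.getD (PySem.List.slice dna.toList (some index) (some (length + index))) 0 + 1))
        PySem.Dict.empty)
      = PySem.Dict.counter ((PySem.List.pyRange 0 ((dna.toList.length : Int) - length) 1).map
          (fun j => PySem.List.slice dna.toList (some j) (some (length + j)))) from by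
    rw [← PySem.Dict.foldl_insert_getD_add_one_eq_counter, List.foldl_map]]
  simp only [PySem.Dict.items_counter]
  rfl

-- foldl Set.add only appends
theorem pvPfx {α : Type} [BEq α] : ∀ (qs seen : List α), seen <+: List.foldl PySem.Set.add seen qs := by
  intro qs
  induction qs with
  | nil => intro seen; exact List.prefix_refl seen
  | cons x t ih =>
    intro seen
    apply List.IsPrefix.trans _ (ih (PySem.Set.add seen x))
    unfold PySem.Set.add
    split
    · exact List.prefix_refl seen
    · exact ⟨[x], rfl⟩

-- duplicates never win a strict-> fold: fold over qs = fold over the unseen dedup tail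
theorem pvSkip : ∀ (qs seen : List (List Char × Int)) (a0 : String × Int),
    (∀ p ∈ seen, p.2 ≤ a0.2) →
    qs.foldl pvStepA a0 = ((List.foldl PySem.Set.add seen qs).drop seen.length).foldl pvStepA a0 := by
  intro qs
  induction qs with
  | nil => intro seen a0 _; simp
  | cons p t ih =>
    intro seen a0 hseen
    by_cases hc : PySem.Set.contains seen p = true
    · have hp : p ∈ seen := by
        simpa [PySem.Set.contains, List.contains_iff_mem] using hc
      have hadd : PySem.Set.add seen p = seen := by
        unfold PySem.Set.add; simp [PySem.Set.contains, List.contains_iff_mem, hp]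
      have hstep : pvStepA a0 p = a0 := by
        have h1 := hseen p hp
        have h2 : ¬ p.2 > a0.2 := by omega
        unfold pvStepA
        simp [h2]
      simp only [List.foldl_cons, hadd, hstep]
      exact ih seen a0 hseen
    · have hp : p ∉ seen := by
        simpa [PySem.Set.contains, List.contains_iff_mem] using hc
      have hadd : PySem.Set.add seen p = seen ++ [p] := by
        unfold PySem.Set.add; simp [PySem.Set.contains, List.contains_iff_mem, hp]
      have h2 : (pvStepA a0 p).2 = max a0.2 p.2 := by
        unfold pvStepA; split <;> simp <;> omega
      have hstep2 : ∀ q ∈ seen ++ [p], q.2 ≤ (pvStepA a0 p).2 := by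
        intro q hq
        rw [h2]
        rcases List.mem_append.mp hq with h | h
        · exact le_trans (hseen q h) (le_max_left _ _)
        · simp at h; subst h; exact le_max_right _ _
      simp only [List.foldl_cons, hadd]
      rw [ih (seen ++ [p]) (pvStepA a0 p) hstep2]
      obtain ⟨u, hu⟩ := pvPfx t (seen ++ [p])
      rw [← hu]
      have eA : List.drop (seen ++ [p]).length (seen ++ [p] ++ u) = u := List.drop_left' rfl
      have eB : List.drop seen.length (seen ++ [p] ++ u) = p :: u := by
        rw [List.append_assoc, List.drop_left' rfl]; simp
      rw [eA, eB]
      simp [List.foldl_cons]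

-- Python's max over a nonempty list is the plain first-max fold
theorem pvMaxCons : ∀ (t : List (List Char × Int)) (x : List Char × Int),
    PySem.List.max? (x :: t) (fun kv => kv.2) = some (t.foldl pvStepM x) := by
  intro t
  induction t with
  | nil => intro x; rfl
  | cons y s ih =>
    intro x
    have h1 : PySem.List.max? (x :: y :: s) (fun kv => kv.2)
        = PySem.List.max? (pvStepM x y :: s) (fun kv => kv.2) := by
      unfold PySem.List.max?
      simp only [List.foldl_cons]
      congr 1
      by_cases hxy : x.2 < y.2 <;> simp [pvStepM, hxy]
    rw [h1, ih]
    simp [List.foldl_cons]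

-- pvStepA tracks pvStepM once the accumulator is a real pair
theorem pvAtracks : ∀ (t : List (List Char × Int)) (m : List Char × Int),
    t.foldl pvStepA (String.ofList m.1, m.2) = (String.ofList (t.foldl pvStepM m).1, (t.foldl pvStepM m).2) := by
  intro t
  induction t with
  | nil => intro m; rfl
  | cons x s ih =>
    intro m
    simp only [List.foldl_cons, pvStepA, pvStepM]
    by_cases h : m.2 < x.2
    · simp [h, show x.2 > m.2 from h, ih]
    · simp [h, show ¬ x.2 > m.2 from h, ih]

-- Set.ofList commutes with an injective map
theorem pvOfListMap (subs : List (List Char)) : ∀ (xs seen : List (List Char)),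
    List.foldl PySem.Set.add (seen.map (pvFk subs)) (xs.map (pvFk subs))
      = (List.foldl PySem.Set.add seen xs).map (pvFk subs) := by
  have hinj : Function.Injective (pvFk subs) := by
    intro a b h
    simpa [pvFk] using congrArg Prod.fst h
  intro xs
  induction xs with
  | nil => intro seen; simp
  | cons x t ih =>
    intro seen
    simp only [List.map_cons, List.foldl_cons]
    have hadd : PySem.Set.add (seen.map (pvFk subs)) (pvFk subs x)
        = (PySem.Set.add seen x).map (pvFk subs) := by
      unfold PySem.Set.add PySem.Set.contains
      have hmem : ((seen.map (pvFk subs)).contains (pvFk subs x)) = (seen.contains x) := by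
        apply Bool.eq_iff_iff.mpr
        simp only [List.contains_iff_mem]
        exact ⟨fun h => by
            obtain ⟨y, hy, he⟩ := List.mem_map.mp h
            exact (hinj he) ▸ hy,
          fun h => List.mem_map_of_mem h⟩
      rw [hmem]
      split
      · rfl
      · simp
    rw [hadd]
    exact ih _

-- ===== VERDICT (by name: the statement is the Claim_ definition above) =====
theorem mostCommonK_spec : Claim_equal_mostCommonK := by
  intro dna length _
  unfold Spec_mostCommonK
  rw [pvA_eq, pvB_eq]
  cases hd : PySem.Set.ofList (pvSubs dna.toList length) with
  | nil =>
    have hsub : pvSubs dna.toList length = [] := by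
      cases hs : pvSubs dna.toList length with
      | nil => rfl
      | cons a t =>
        exfalso
        have ha : a ∈ PySem.Set.ofList (pvSubs dna.toList length) :=
          (PySem.Set.mem_ofList _ a).mpr (by rw [hs]; exact List.mem_cons_self)
        rw [hd] at ha
        simp at ha
    rw [hsub]
    simp
  | cons e es =>
    have he : e ∈ pvSubs dna.toList length := by
      have : e ∈ PySem.Set.ofList (pvSubs dna.toList length) := by
        rw [hd]; exact List.mem_cons_self
      exact (PySem.Set.mem_ofList _ e).mp this
    have hcount : (0 : Int) < ((pvSubs dna.toList length).count e : Int) := by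
      exact_mod_cast List.count_pos_iff.mpr he
    -- LHS: fold over all pairs = fold over deduped pairs
    have hL1 := pvSkip ((pvSubs dna.toList length).map (pvFk (pvSubs dna.toList length))) [] ("", 0)
      (by intro q hq; simp at hq)
    simp only [List.length_nil, List.drop_zero] at hL1
    have hmap : List.foldl PySem.Set.add []
        ((pvSubs dna.toList length).map (pvFk (pvSubs dna.toList length)))
        = (PySem.Set.ofList (pvSubs dna.toList length)).map (pvFk (pvSubs dna.toList length)) := by
      have := pvOfListMap (pvSubs dna.toList length) (pvSubs dna.toList length) []
      simpa [PySem.Set.ofList, PySem.Set.empty] using this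
    rw [hmap, hd] at hL1
    rw [hL1]
    -- first fold step on the A side
    have hstep1 : pvStepA ("", 0) (pvFk (pvSubs dna.toList length) e)
        = (String.ofList (pvFk (pvSubs dna.toList length) e).1,
           (pvFk (pvSubs dna.toList length) e).2) := by
      unfold pvStepA pvFk
      simp only []
      rw [if_pos (by simpa [pvFk] using hcount)]
    simp only [List.map_cons, List.foldl_cons, hstep1, pvAtracks]
    -- RHS
    simp only [hd, List.map_cons, List.isEmpty_cons, Bool.false_eq_true, if_false]
    rw [pvMaxCons]
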